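-- pv_equiv track=rewrite | github.com/goathoon/CodingTest | python/BruteForce/programmers_모의고사.py | solution
-- ===== SOURCE A (Python) =====
-- def solution(answers):
--     one = [1,2,3,4,5]
--     two = [2,1,2,3,2,4,2,5]
--     three = [3,3,1,1,2,2,4,4,5,5]
--     answer_cnt = [[1,0],[2,0],[3,0]]
--     for i in range(len(answers)):
--         one_index = i % 5
--         two_index = i % 8
--         three_index = i % 10
--         if answers[i] == one[one_index] :
--             answer_cnt[0][1] += 1
--         if answers[i] == two[two_index] :
--             answer_cnt[1][1] += 1
--         if answers[i] == three[three_index] :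
--             answer_cnt[2][1] += 1
--     answer_cnt.sort(key = lambda x : (-x[1], x[0])) # 먼저 점수 내림차순으로 정렬후 몇번 같을 경우 수포자 번호순으로 오름차순
--     answer = []
--     answer.append(answer_cnt[0][0])
--     if answer_cnt[0][1] == answer_cnt[1][1]:
--         answer.append(answer_cnt[1][0])
--     if answer_cnt[0][1] == answer_cnt[2][1]:
--         answer.append(answer_cnt[2][0])
--     return answer
-- ===== SOURCE B (Python) =====
-- def solution(answers):
--     # Histogram of (position mod 40, answer) pairs; 40 = lcm of the three pattern
--     # periods, so each pattern's score is read off the histogram with 40 lookups.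
--     hist = {}
--     for i, a in enumerate(answers):
--         key = (i % 40, a)
--         hist[key] = hist.get(key, 0) + 1
--     patterns = [[1, 2, 3, 4, 5], [2, 1, 2, 3, 2, 4, 2, 5], [3, 3, 1, 1, 2, 2, 4, 4, 5, 5]]
--     scores = [sum(hist.get((r, p[r % len(p)]), 0) for r in range(40)) for p in patterns]
--     best = max(scores)
--     return [i + 1 for i, s in enumerate(scores) if s == best]
-- ===== Notes on version B (the rewrite author's own statement) =====
-- stated objective: alternative
-- what changed: B builds one histogram keyed by (index mod 40, answer) (40 = lcm of the pattern periods) and reads each pattern's score off the histogram with 40 lookups, then returns the ids whose score equals the max, instead of A's per-element comparisons against each pattern followed by a sort of the score table.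
import Mathlib
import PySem

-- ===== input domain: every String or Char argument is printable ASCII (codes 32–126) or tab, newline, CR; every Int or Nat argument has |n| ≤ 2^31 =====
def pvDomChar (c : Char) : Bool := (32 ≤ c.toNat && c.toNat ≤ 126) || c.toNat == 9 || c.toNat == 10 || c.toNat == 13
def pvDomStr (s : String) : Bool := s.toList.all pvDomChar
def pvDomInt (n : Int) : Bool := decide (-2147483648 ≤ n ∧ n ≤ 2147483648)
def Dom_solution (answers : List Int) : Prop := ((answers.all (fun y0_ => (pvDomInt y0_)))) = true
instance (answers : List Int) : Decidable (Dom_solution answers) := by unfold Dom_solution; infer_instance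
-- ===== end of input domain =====

-- B replaces A's per-element pattern comparisons + score-table sort by a histogram keyed
-- by (index mod 40, answer) read off with 40 lookups per pattern, then max-and-filter
-- over the ids (alternative algorithm, same asymptotic cost).

-- ===== PORT A =====
def solution (answers : List Int) : List Int :=
  let one : List Int := [1, 2, 3, 4, 5]
  let two : List Int := [2, 1, 2, 3, 2, 4, 2, 5]
  let three : List Int := [3, 3, 1, 1, 2, 2, 4, 4, 5, 5]
  -- answer_cnt = [[1,c1],[2,c2],[3,c3]]; the three mutable counters are the fold state
  let cnt := (PySem.List.pyRange 0 answers.length 1).foldl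
    (fun (c : Int × Int × Int) i =>
      (if PySem.List.pyGetD answers i 0 = PySem.List.pyGetD one (PySem.Int.mod i 5) 0 then c.1 + 1 else c.1,
       if PySem.List.pyGetD answers i 0 = PySem.List.pyGetD two (PySem.Int.mod i 8) 0 then c.2.1 + 1 else c.2.1,
       if PySem.List.pyGetD answers i 0 = PySem.List.pyGetD three (PySem.Int.mod i 10) 0 then c.2.2 + 1 else c.2.2))
    (0, 0, 0)
  -- answer_cnt.sort(key = lambda x : (-x[1], x[0]))
  let srt := PySem.List.sorted2 [((1 : Int), cnt.1), (2, cnt.2.1), (3, cnt.2.2)]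
      (fun p => -p.2) (fun p => p.1)
  match srt with
  | c0 :: c1 :: c2 :: _ =>
      [c0.1] ++ (if c0.2 = c1.2 then [c1.1] else []) ++ (if c0.2 = c2.2 then [c2.1] else [])
  | _ => []

-- ===== PORT B =====
def solution_alt (answers : List Int) : List Int :=
  -- hist[(i % 40, a)] = hist.get(key, 0) + 1 over enumerate(answers)
  let hist := (PySem.List.enumerate answers).foldl
    (fun (d : PySem.Dict (Int × Int) Int) ia => d.modify (PySem.Int.mod ia.1 40, ia.2) 0 (· + 1))
    PySem.Dict.empty
  let patterns : List (List Int) := [[1,2,3,4,5],[2,1,2,3,2,4,2,5],[3,3,1,1,2,2,4,4,5,5]]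
  -- scores = [sum(hist.get((r, p[r % len(p)]), 0) for r in range(40)) for p in patterns]
  let scores := patterns.map (fun p =>
    ((PySem.List.pyRange 0 40 1).map
      (fun r => hist.getD (r, PySem.List.pyGetD p (PySem.Int.mod r (p.length : Int)) 0) 0)).sum)
  let best := PySem.List.maxD scores (fun x => x) 0
  ((PySem.List.enumerate scores).filter (fun q => q.2 = best)).map (fun q => q.1 + 1)

-- ===== PRECONDITION & SPEC =====
def Spec_solution (answers : List Int) (out : List Int) : Prop := out = solution_alt answers
instance (answers : List Int) (out : List Int) : Decidable (Spec_solution answers out) := by unfold Spec_solution; infer_instance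

-- ===== CLAIM (what is proved, stated in full; the proofs are below) =====
def Claim_equal_solution : Prop := ∀ (answers : List Int), Dom_solution answers → Spec_solution answers (solution answers)

-- ===== LEMMAS AND PROOFS =====

-- score of one pattern on the remaining answers, first index k (structural on the answers)
def scP (p : List Int) (m : Int) : List Int → Int → Int
  | [], _ => 0
  | a :: xs, k => (if a = PySem.List.pyGetD p (PySem.Int.mod k m) 0 then 1 else 0) + scP p m xs (k + 1)

lemma foldA_eq (one two three : List Int) (xs : List Int) : ∀ (pre : List Int) (c : Int × Int × Int),
    (PySem.List.pyRange (pre.length : Int) ((pre.length : Int) + xs.length) 1).foldl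
      (fun (c : Int × Int × Int) i =>
        (if PySem.List.pyGetD (pre ++ xs) i 0 = PySem.List.pyGetD one (PySem.Int.mod i 5) 0 then c.1 + 1 else c.1,
         if PySem.List.pyGetD (pre ++ xs) i 0 = PySem.List.pyGetD two (PySem.Int.mod i 8) 0 then c.2.1 + 1 else c.2.1,
         if PySem.List.pyGetD (pre ++ xs) i 0 = PySem.List.pyGetD three (PySem.Int.mod i 10) 0 then c.2.2 + 1 else c.2.2)) c
    = (c.1 + scP one 5 xs pre.length, c.2.1 + scP two 8 xs pre.length, c.2.2 + scP three 10 xs pre.length) := by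
  induction xs with
  | nil =>
    intro pre c
    rw [PySem.List.pyRange_one_eq_nil (by simp)]
    simp [scP]
  | cons a xs ih =>
    intro pre c
    rw [PySem.List.pyRange_one_cons (by push_cast [List.length_cons]; omega), List.foldl_cons]
    have hget : PySem.List.pyGetD (pre ++ a :: xs) ((pre.length : Nat) : Int) 0 = a := by
      rw [PySem.List.pyGetD_natCast]
      simp [List.getD]
    have hsplit : pre ++ a :: xs = (pre ++ [a]) ++ xs := by simp
    have hlen : (((pre ++ [a]).length : Nat) : Int) = (pre.length : Int) + 1 := by
      push_cast [List.length_append, List.length_cons, List.length_nil]; ring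
    rw [hget, hsplit,
        show (pre.length : Int) + 1 = (((pre ++ [a]).length : Nat) : Int) from hlen.symm,
        show (pre.length : Int) + ((a :: xs).length : Int) = (((pre ++ [a]).length : Nat) : Int) + (xs.length : Int) by
          push_cast [List.length_append, List.length_cons, List.length_nil]; ring]
    rw [ih (pre ++ [a])]
    rw [hlen]
    simp only [scP]
    refine Prod.ext ?_ (Prod.ext ?_ ?_) <;> simp <;> split_ifs <;> ring

-- the counting loop of A produces the three pattern scores
lemma cnt_eq_score (answers : List Int) :
    (PySem.List.pyRange 0 answers.length 1).foldl
      (fun (c : Int × Int × Int) i =>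
        (if PySem.List.pyGetD answers i 0 = PySem.List.pyGetD [1,2,3,4,5] (PySem.Int.mod i 5) 0 then c.1 + 1 else c.1,
         if PySem.List.pyGetD answers i 0 = PySem.List.pyGetD [2,1,2,3,2,4,2,5] (PySem.Int.mod i 8) 0 then c.2.1 + 1 else c.2.1,
         if PySem.List.pyGetD answers i 0 = PySem.List.pyGetD [3,3,1,1,2,2,4,4,5,5] (PySem.Int.mod i 10) 0 then c.2.2 + 1 else c.2.2))
      (0, 0, 0)
    = (scP [1,2,3,4,5] 5 answers 0, scP [2,1,2,3,2,4,2,5] 8 answers 0, scP [3,3,1,1,2,2,4,4,5,5] 10 answers 0) := by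
  have h := foldA_eq [1,2,3,4,5] [2,1,2,3,2,4,2,5] [3,3,1,1,2,2,4,4,5,5] answers [] (0, 0, 0)
  simp only [List.nil_append, List.length_nil, Nat.cast_zero, zero_add] at h
  exact h

-- the key list B's histogram counts: (i % 40, answers[i]) over enumerate(answers, k)
def keyList (xs : List Int) (k : Int) : List (Int × Int) :=
  (PySem.List.enumerate xs k).map (fun ia => (PySem.Int.mod ia.1 40, ia.2))

-- sum over range(40) of an indicator supported at j
lemma sum_indicator (j t : Int) (h0 : 0 ≤ j) (h40 : j < 40) (f : Int → Int)
    (hf : ∀ r, 0 ≤ r → r < 40 → f r = if r = j then t else 0) :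
    ((PySem.List.pyRange 0 40 1).map f).sum = t := by
  rw [PySem.List.pyRange_one_append 0 j 40 h0 (by omega),
      PySem.List.pyRange_one_cons (a := j) (b := 40) h40]
  simp only [List.map_append, List.map_cons, List.sum_append, List.sum_cons]
  have hz1 : ((PySem.List.pyRange 0 j 1).map f).sum = 0 := by
    apply List.sum_eq_zero; intro x hx
    simp only [List.mem_map] at hx
    obtain ⟨r, hr, rfl⟩ := hx
    rw [PySem.List.mem_pyRange_one] at hr
    rw [hf r hr.1 (by omega)]
    simp [show ¬ r = j by omega]
  have hz2 : ((PySem.List.pyRange (j+1) 40 1).map f).sum = 0 := by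
    apply List.sum_eq_zero; intro x hx
    simp only [List.mem_map] at hx
    obtain ⟨r, hr, rfl⟩ := hx
    rw [PySem.List.mem_pyRange_one] at hr
    rw [hf r (by omega) hr.2]
    simp [show ¬ r = j by omega]
  rw [hz1, hz2, hf j h0 h40]
  simp

-- B's 40 lookups of one pattern's histogram rows sum to that pattern's score
lemma sum_count_eq_scP (p : List Int) (L : Int) (hL : (p.length : Int) = L)
    (hdvd : L ∣ 40) (xs : List Int) : ∀ (k : Int), 0 ≤ k →
    ((PySem.List.pyRange 0 40 1).map
      (fun r => ((keyList xs k).count (r, PySem.List.pyGetD p (PySem.Int.mod r L) 0) : Int))).sum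
    = scP p L xs k := by
  induction xs with
  | nil => intro k hk; simp [keyList, PySem.List.enumerate, scP]
  | cons a xs ih =>
    intro k hk
    have hcons : keyList (a :: xs) k = (PySem.Int.mod k 40, a) :: keyList xs (k + 1) := by
      simp [keyList, PySem.List.enumerate_cons]
    have hsplit : ∀ r : Int,
        ((keyList (a :: xs) k).count (r, PySem.List.pyGetD p (PySem.Int.mod r L) 0) : Int)
        = ((keyList xs (k+1)).count (r, PySem.List.pyGetD p (PySem.Int.mod r L) 0) : Int)
          + (if (r, PySem.List.pyGetD p (PySem.Int.mod r L) 0) = (PySem.Int.mod k 40, a) then 1 else 0) := by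
      intro r
      rw [hcons, List.count_cons]
      push_cast
      split_ifs with h1 h2 h2 <;> simp_all
    have hmapsplit :
        (PySem.List.pyRange 0 40 1).map
          (fun r => ((keyList (a :: xs) k).count (r, PySem.List.pyGetD p (PySem.Int.mod r L) 0) : Int))
        = (PySem.List.pyRange 0 40 1).map
          (fun r => ((keyList xs (k+1)).count (r, PySem.List.pyGetD p (PySem.Int.mod r L) 0) : Int)
            + (if (r, PySem.List.pyGetD p (PySem.Int.mod r L) 0) = (PySem.Int.mod k 40, a) then 1 else 0)) :=
      List.map_congr_left (fun r _ => hsplit r)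
    rw [hmapsplit, PySem.List.sum_map_add_int, ih (k+1) (by omega)]
    have hLpos : 0 < L := by
      rcases lt_trichotomy L 0 with h | h | h
      · exfalso; omega
      · exfalso; rw [h] at hdvd; norm_num at hdvd
      · exact h
    have hmm : PySem.Int.mod (PySem.Int.mod k 40) L = PySem.Int.mod k L := by
      rw [PySem.Int.mod_eq_emod_of_pos (by norm_num : (0:Int) < 40),
          PySem.Int.mod_eq_emod_of_pos hLpos, PySem.Int.mod_eq_emod_of_pos hLpos]
      exact Int.emod_emod_of_dvd k hdvd
    have hind : ((PySem.List.pyRange 0 40 1).map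
        (fun r => if (r, PySem.List.pyGetD p (PySem.Int.mod r L) 0) = (PySem.Int.mod k 40, a) then (1:Int) else 0)).sum
        = if a = PySem.List.pyGetD p (PySem.Int.mod k L) 0 then 1 else 0 := by
      apply sum_indicator (PySem.Int.mod k 40) _
        (PySem.Int.mod_nonneg k (by norm_num)) (PySem.Int.mod_lt k (by norm_num))
      intro r _ _
      by_cases hr : r = PySem.Int.mod k 40
      · subst hr
        rw [hmm]
        simp [Prod.mk.injEq, eq_comm]
      · rw [if_neg (fun h => hr (congrArg Prod.fst h)), if_neg hr]
    rw [hind, scP]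
    ring

-- B's histogram lookup is a count of the key list
lemma histogram_getD (answers : List Int) (key : Int × Int) :
    ((PySem.List.enumerate answers).foldl
      (fun (d : PySem.Dict (Int × Int) Int) ia => d.modify (PySem.Int.mod ia.1 40, ia.2) 0 (· + 1))
      PySem.Dict.empty).getD key 0
    = ((keyList answers 0).count key : Int) := by
  have h : (PySem.List.enumerate answers).foldl
      (fun (d : PySem.Dict (Int × Int) Int) ia => d.modify (PySem.Int.mod ia.1 40, ia.2) 0 (· + 1))
      PySem.Dict.empty
      = (keyList answers 0).foldl (fun d x => d.modify x 0 (· + 1)) PySem.Dict.empty := by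
    rw [keyList, List.foldl_map]
  rw [h, PySem.Dict.getD_foldl_modify_add_one]
  simp [PySem.Dict.getD, PySem.Dict.empty, PySem.Dict.get?]

-- the Python sort, evaluated on the concrete three-row table with symbolic scores
lemma sorted2_eval (s1 s2 s3 : Int) :
    PySem.List.sorted2 [((1 : Int), s1), (2, s2), (3, s3)] (fun p => -p.2) (fun p => p.1)
    = if s1 < s2 then
        (if s2 < s3 then [(3, s3), (2, s2), (1, s1)]
         else if s1 < s3 then [(2, s2), (3, s3), (1, s1)] else [(2, s2), (1, s1), (3, s3)])
      else
        (if s1 < s3 then [(3, s3), (1, s1), (2, s2)]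
         else if s2 < s3 then [(1, s1), (3, s3), (2, s2)] else [(1, s1), (2, s2), (3, s3)]) := by
  by_cases h12 : s1 < s2 <;> by_cases h13 : s1 < s3 <;> by_cases h23 : s2 < s3 <;>
    simp [PySem.List.sorted2, PySem.List.insertBy, h12, h13, h23]

-- A's sort-and-compare tail equals B's max-and-filter tail, for arbitrary scores
lemma tail_eq (s1 s2 s3 : Int) :
    (match PySem.List.sorted2 [((1 : Int), s1), (2, s2), (3, s3)] (fun p => -p.2) (fun p => p.1) with
     | c0 :: c1 :: c2 :: _ =>
        [c0.1] ++ (if c0.2 = c1.2 then [c1.1] else []) ++ (if c0.2 = c2.2 then [c2.1] else [])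
     | _ => ([] : List Int))
    = ((PySem.List.enumerate [s1, s2, s3]).filter
        (fun q => q.2 = PySem.List.maxD [s1, s2, s3] (fun x => x) 0)).map (fun q => q.1 + 1) := by
  rw [sorted2_eval]
  by_cases h12 : s1 < s2 <;> by_cases h13 : s1 < s3 <;> by_cases h23 : s2 < s3 <;>
  by_cases e12 : s1 = s2 <;> by_cases e13 : s1 = s3 <;> by_cases e23 : s2 = s3 <;>
    simp_all [PySem.List.maxD, PySem.List.max?, PySem.List.enumerate, List.filter, eq_comm] <;>
    (try split_ifs) <;> (try simp_all [eq_comm]) <;>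
    (try split_ifs) <;> (try simp_all [eq_comm])
  all_goals omega

-- ===== VERDICT (by name: the statement is the Claim_ definition above) =====
theorem solution_spec : Claim_equal_solution := by
  intro answers _
  unfold Spec_solution
  simp only [solution, solution_alt, List.map_cons, List.map_nil]
  rw [cnt_eq_score]
  have hb : ∀ (p : List Int) (L : Int), (p.length : Int) = L → L ∣ 40 →
      ((PySem.List.pyRange 0 40 1).map
        (fun r => ((PySem.List.enumerate answers).foldl
          (fun (d : PySem.Dict (Int × Int) Int) ia => d.modify (PySem.Int.mod ia.1 40, ia.2) 0 (· + 1))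
          PySem.Dict.empty).getD (r, PySem.List.pyGetD p (PySem.Int.mod r (p.length : Int)) 0) 0)).sum
      = scP p L answers 0 := by
    intro p L hL hdvd
    have := sum_count_eq_scP p L hL hdvd answers 0 le_rfl
    rw [← this, hL]
    exact congrArg List.sum (List.map_congr_left (fun r _ => histogram_getD answers _))
  simp only [hb [1,2,3,4,5] 5 (by norm_num) (by norm_num),
      hb [2,1,2,3,2,4,2,5] 8 (by norm_num) (by norm_num),
      hb [3,3,1,1,2,2,4,4,5,5] 10 (by norm_num) (by norm_num)]
  exact tail_eq _ _ _
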